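-- pv_equiv track=rewrite | github.com/Caturan/python-Lecture | __interview_questions/zigzag_list.py | solution
-- ===== SOURCE A (Python) =====
-- def solution(numbers):
--     solution = []
--     for i in range(len(numbers)-2):
--         if numbers[i] > numbers[i+1] < numbers[i+2]:
--             solution.append(1)
--         elif numbers[i] < numbers[i+1] > numbers[i+2]:
--             solution.append(1)
--         else:
--             solution.append(0)
--     return solution
-- ===== SOURCE B (Python) =====
-- def solution(numbers):
--     # Zero-filled output; scatter 1s at positions where the compressed trend
--     # (indices of strict rises/falls, plateaus skipped) reverses at adjacent indices.
--     n = len(numbers)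
--     out = [0] * (n - 2)
--     trend = [(i, -1 if numbers[i] > numbers[i + 1] else 1)
--              for i in range(n - 1) if numbers[i] != numbers[i + 1]]
--     for (i, si), (j, sj) in zip(trend, trend[1:]):
--         if j == i + 1 and si != sj:
--             out[i] = 1
--     return out
-- ===== Notes on version B (the rewrite author's own statement) =====
-- stated objective: alternative
-- what changed: B pre-allocates a zero output array, builds a compressed trend list of (index, direction) for strict rises/falls only (plateaus dropped), and scatter-writes 1 where two consecutive trend entries sit at adjacent indices with opposite directions, instead of A's single pass appending a 0/1 per raw index triple.
import Mathlib
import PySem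

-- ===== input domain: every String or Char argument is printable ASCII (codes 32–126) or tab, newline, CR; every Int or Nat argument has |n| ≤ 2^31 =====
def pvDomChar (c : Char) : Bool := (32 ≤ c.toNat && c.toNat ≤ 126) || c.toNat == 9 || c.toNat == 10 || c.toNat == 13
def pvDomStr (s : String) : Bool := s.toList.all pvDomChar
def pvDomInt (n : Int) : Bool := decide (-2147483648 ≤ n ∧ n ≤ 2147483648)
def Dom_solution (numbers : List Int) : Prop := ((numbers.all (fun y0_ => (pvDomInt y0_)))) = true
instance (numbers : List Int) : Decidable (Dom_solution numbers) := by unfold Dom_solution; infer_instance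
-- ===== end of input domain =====

-- B pre-allocates a zero output and scatter-writes 1s where a compressed trend list (plateaus dropped) reverses at adjacent indices; alternative decomposition, same cost.

-- ===== PORT A =====
-- loop 'for i in range(len(numbers)-2)' appending 1/1/0 per the chained comparisons
def solution (numbers : List Int) : List Int :=
  (PySem.List.pyRange 0 ((numbers.length : Int) - 2) 1).foldl
    (fun acc i =>
      acc ++ [if PySem.List.pyGetD numbers i 0 > PySem.List.pyGetD numbers (i+1) 0 ∧
                 PySem.List.pyGetD numbers (i+1) 0 < PySem.List.pyGetD numbers (i+2) 0 then 1
              else if PySem.List.pyGetD numbers i 0 < PySem.List.pyGetD numbers (i+1) 0 ∧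
                      PySem.List.pyGetD numbers (i+1) 0 > PySem.List.pyGetD numbers (i+2) 0 then 1
              else 0]) []

-- ===== PORT B =====
-- the comprehension building 'trend'; numbers[i], numbers[i+1] are always in range here, so getD is exact
def pvTrend (l : List Int) : List (Nat × Int) :=
  (List.range (l.length - 1)).filterMap (fun i =>
    if l.getD i 0 ≠ l.getD (i+1) 0 then
      some (i, if l.getD i 0 > l.getD (i+1) 0 then (-1 : Int) else 1)
    else none)

-- the loop body: 'if j == i + 1 and si != sj: out[i] = 1'
def pvStep (acc : List Int) (p : (Nat × Int) × (Nat × Int)) : List Int :=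
  if p.2.1 = p.1.1 + 1 ∧ p.1.2 ≠ p.2.2 then acc.set p.1.1 1 else acc

def solution_alt (numbers : List Int) : List Int :=
  ((pvTrend numbers).zip (pvTrend numbers).tail).foldl pvStep
    (List.replicate (numbers.length - 2) 0)

-- ===== PRECONDITION & SPEC =====
def Spec_solution (numbers : List Int) (out : List Int) : Prop := out = solution_alt numbers
instance (numbers : List Int) (out : List Int) : Decidable (Spec_solution numbers out) := by unfold Spec_solution; infer_instance

-- ===== CLAIM (what is proved, stated in full; the proofs are below) =====
def Claim_equal_solution : Prop := ∀ (numbers : List Int), Dom_solution numbers → Spec_solution numbers (solution numbers)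

-- ===== LEMMAS AND PROOFS =====

-- reference recursion: 0/1 marker per consecutive triple
def pvZig : List Int → List Int
  | a :: b :: c :: t =>
      (if a > b ∧ b < c then 1 else if a < b ∧ b > c then 1 else 0) :: pvZig (b :: c :: t)
  | _ => []

def pvW (l : List Int) (k : Nat) : Int :=
  if l.getD k 0 > l.getD (k+1) 0 ∧ l.getD (k+1) 0 < l.getD (k+2) 0 then 1
  else if l.getD k 0 < l.getD (k+1) 0 ∧ l.getD (k+1) 0 > l.getD (k+2) 0 then 1
  else 0

lemma pvW_cons (a : Int) (l : List Int) (k : Nat) : pvW (a :: l) (k+1) = pvW l k := by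
  simp [pvW]

lemma map_range_pvW (l : List Int) :
    (List.range (l.length - 2)).map (pvW l) = pvZig l := by
  match l with
  | a :: b :: c :: t =>
    have ih := map_range_pvW (b :: c :: t)
    simp only [List.length_cons] at *
    have h2 : (t.length + 1 + 1 + 1) - 2 = (t.length + 1) := by omega
    rw [h2, List.range_succ_eq_map]
    simp only [List.map_cons, List.map_map]
    have hs : ((List.range t.length).map (pvW (a :: b :: c :: t) ∘ Nat.succ))
        = (List.range t.length).map (pvW (b :: c :: t)) := by
      apply List.map_congr_left
      intro k _
      simp only [Function.comp]
      exact pvW_cons a (b :: c :: t) k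
    rw [hs]
    rw [show t.length + 1 + 1 - 2 = t.length from by omega] at ih
    rw [ih]
    simp [pvZig, pvW]
  | [] => simp [pvZig]
  | [a] => simp [pvZig]
  | [a, b] => simp [pvZig]

lemma solution_eq_pvZig (l : List Int) : solution l = pvZig l := by
  unfold solution
  rw [PySem.List.pyRange_one]
  rw [PySem.List.foldl_append_singleton_eq_map]
  simp only [List.map_map, List.nil_append]
  rw [show ((l.length : Int) - 2 - 0).toNat = l.length - 2 from by omega]
  rw [← map_range_pvW l]
  apply List.map_congr_left
  intro k hk
  simp only [List.mem_range] at hk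
  simp only [Function.comp, zero_add, pvW]
  have h1 : ((k : Int) + 1) = ((k + 1 : Nat) : Int) := by push_cast; ring
  have h2 : ((k : Int) + 2) = ((k + 2 : Nat) : Int) := by push_cast; ring
  rw [h1, h2]
  simp only [PySem.List.pyGetD_natCast, List.getD]
  rfl

-- B side: characterize membership in the trend list
lemma mem_pvTrend (l : List Int) (p : Nat × Int) :
    p ∈ pvTrend l ↔ p.1 < l.length - 1 ∧ l.getD p.1 0 ≠ l.getD (p.1+1) 0 ∧
      p.2 = (if l.getD p.1 0 > l.getD (p.1+1) 0 then (-1 : Int) else 1) := by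
  unfold pvTrend
  simp only [List.mem_filterMap, List.mem_range]
  constructor
  · rintro ⟨i, hi, hf⟩
    by_cases h : l.getD i 0 ≠ l.getD (i+1) 0
    · simp only [if_pos h, Option.some.injEq] at hf
      cases hf
      exact ⟨hi, h, rfl⟩
    · rw [if_neg h] at hf; cases hf
  · rintro ⟨h1, h2, h3⟩
    exact ⟨p.1, h1, by
      rw [if_pos h2]
      exact congrArg some (Prod.ext rfl h3.symm)⟩

-- trend indices are strictly increasing
lemma pvTrend_pairwise (l : List Int) :
    (pvTrend l).Pairwise (fun a b => a.1 < b.1) := by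
  unfold pvTrend
  rw [List.pairwise_filterMap]
  apply List.Pairwise.imp_of_mem (l := List.range (l.length - 1))
    (R := fun a b => a < b)
  · intro a b _ _ hab x hx y hy
    by_cases h : l.getD a 0 ≠ l.getD (a+1) 0
    · rw [if_pos h] at hx
      by_cases h' : l.getD b 0 ≠ l.getD (b+1) 0
      · rw [if_pos h'] at hy
        cases hx; cases hy; exact hab
      · rw [if_neg h'] at hy; cases hy
    · rw [if_neg h] at hx; cases hx
  · exact List.pairwise_lt_range

-- in a fst-strictly-increasing list, members at adjacent indices are adjacent in the list
lemma adj_mem_zip (T : List (Nat × Int)) (h : T.Pairwise (fun a b => a.1 < b.1))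
    (x y : Nat × Int) (hx : x ∈ T) (hy : y ∈ T) (hxy : y.1 = x.1 + 1) :
    (x, y) ∈ T.zip T.tail := by
  induction T with
  | nil => cases hx
  | cons t rest ih =>
    rcases List.pairwise_cons.mp h with ⟨ht, hrest⟩
    rcases List.mem_cons.mp hx with hx1 | hx2
    · -- x is the head; y must be the head of rest
      subst hx1
      rcases List.mem_cons.mp hy with hy1 | hy2
      · exfalso; rw [hy1] at hxy; omega
      · match rest, hy2, hrest, ht with
        | r :: rest', hy2, hrest, ht =>
          rcases List.mem_cons.mp hy2 with hy3 | hy4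
          · subst hy3
            simp [List.zip]
          · exfalso
            have hr := ht r (List.mem_cons_self)
            have hry := (List.pairwise_cons.mp hrest).1 y hy4
            omega
    · -- x in rest; y cannot be the head (head is smallest)
      rcases List.mem_cons.mp hy with hy1 | hy2
      · exfalso
        have := ht x hx2
        rw [hy1] at hxy; omega
      · have hmem := ih hrest hx2 hy2
        match rest, hmem with
        | r :: rest', hmem =>
          simp only [List.tail_cons] at *
          exact List.mem_cons_of_mem _ hmem

lemma mem_zip_tail (T : List (Nat × Int)) (p : (Nat × Int) × (Nat × Int))
    (h : p ∈ T.zip T.tail) : p.1 ∈ T ∧ p.2 ∈ T := by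
  obtain ⟨h1, h2⟩ := List.of_mem_zip (a := p.1) (b := p.2) (by simpa using h)
  exact ⟨h1, List.mem_of_mem_tail h2⟩

-- value at k after all scatter writes (writes are always the value 1)
lemma getD_foldl_pvStep (Z : List ((Nat × Int) × (Nat × Int))) (acc : List Int) (k : Nat)
    (hR : ∀ p ∈ Z, (p.2.1 = p.1.1 + 1 ∧ p.1.2 ≠ p.2.2) → p.1.1 < acc.length) :
    (Z.foldl pvStep acc).getD k 0
      = if (∃ p ∈ Z, (p.2.1 = p.1.1 + 1 ∧ p.1.2 ≠ p.2.2) ∧ p.1.1 = k) then 1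
        else acc.getD k 0 := by
  induction Z generalizing acc with
  | nil => simp
  | cons p Z' ih =>
    simp only [List.foldl_cons]
    by_cases hc : p.2.1 = p.1.1 + 1 ∧ p.1.2 ≠ p.2.2
    · have hlen : p.1.1 < acc.length := hR p (List.mem_cons_self) hc
      have hstep : pvStep acc p = acc.set p.1.1 1 := by simp [pvStep, hc]
      rw [hstep]
      rw [ih (acc.set p.1.1 1)
        (by intro q hq hcq; simpa using hR q (List.mem_cons_of_mem _ hq) hcq)]
      by_cases he : ∃ q ∈ Z', (q.2.1 = q.1.1 + 1 ∧ q.1.2 ≠ q.2.2) ∧ q.1.1 = k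
      · rw [if_pos he, if_pos]
        obtain ⟨q, hq, hcq⟩ := he
        exact ⟨q, List.mem_cons_of_mem _ hq, hcq⟩
      · rw [if_neg he]
        by_cases hk : p.1.1 = k
        · subst hk
          rw [if_pos ⟨p, List.mem_cons_self, hc, rfl⟩]
          rw [List.getD_eq_getElem?_getD, List.getElem?_set_self (by omega)]
          simp
        · rw [List.getD_eq_getElem?_getD, List.getElem?_set_ne (by omega),
              ← List.getD_eq_getElem?_getD]
          rw [if_neg]
          rintro ⟨q, hq, hcq, hqk⟩
          rcases List.mem_cons.mp hq with h1 | h2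
          · subst h1; exact hk hqk
          · exact he ⟨q, h2, hcq, hqk⟩
    · have hstep : pvStep acc p = acc := by simp [pvStep, hc]
      rw [hstep, ih acc (by intro q hq hcq; exact hR q (List.mem_cons_of_mem _ hq) hcq)]
      congr 1
      simp only [eq_iff_iff]
      constructor
      · rintro ⟨q, hq, hcq⟩; exact ⟨q, List.mem_cons_of_mem _ hq, hcq⟩
      · rintro ⟨q, hq, hcq⟩
        rcases List.mem_cons.mp hq with h1 | h2
        · subst h1; exact absurd hcq.1 (by tauto)
        · exact ⟨q, h2, hcq⟩

lemma length_foldl_pvStep (Z : List ((Nat × Int) × (Nat × Int))) (acc : List Int) :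
    (Z.foldl pvStep acc).length = acc.length := by
  induction Z generalizing acc with
  | nil => rfl
  | cons p Z' ih =>
    simp only [List.foldl_cons]
    rw [ih]
    unfold pvStep
    split <;> simp

lemma solution_alt_getD (l : List Int) (k : Nat) (hk : k < l.length - 2) :
    (solution_alt l).getD k 0 = pvW l k := by
  unfold solution_alt
  have hR : ∀ p ∈ (pvTrend l).zip (pvTrend l).tail,
      (p.2.1 = p.1.1 + 1 ∧ p.1.2 ≠ p.2.2) →
      p.1.1 < (List.replicate (l.length - 2) (0:Int)).length := by
    intro p hp hc
    obtain ⟨_, h2⟩ := mem_zip_tail _ p hp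
    have h3 := ((mem_pvTrend l p.2).mp h2).1
    simp only [List.length_replicate]
    omega
  rw [getD_foldl_pvStep _ _ k hR]
  have hadd : l.getD (k+1+1) 0 = l.getD (k+2) 0 := rfl
  by_cases he : ∃ p ∈ (pvTrend l).zip (pvTrend l).tail,
      (p.2.1 = p.1.1 + 1 ∧ p.1.2 ≠ p.2.2) ∧ p.1.1 = k
  · rw [if_pos he]
    obtain ⟨⟨⟨i, si⟩, ⟨j, sj⟩⟩, hp, ⟨hadj, hne⟩, hpk⟩ := he
    simp only at hadj hne hpk
    subst hpk; subst hadj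
    obtain ⟨h1, h2⟩ := mem_zip_tail _ _ hp
    obtain ⟨hi1, hd1, hs1⟩ := (mem_pvTrend l _).mp h1
    obtain ⟨hi2, hd2, hs2⟩ := (mem_pvTrend l _).mp h2
    simp only at hi1 hd1 hs1 hi2 hd2 hs2
    rw [hadd] at hd2
    rw [hs1, hs2, hadd] at hne
    unfold pvW
    split_ifs at hne ⊢ <;> omega
  · rw [if_neg he]
    rw [List.getD_eq_getElem?_getD, List.getElem?_replicate, if_pos (by omega)]
    simp only [Option.getD_some]
    unfold pvW
    split_ifs with h1 h2
    · exfalso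
      apply he
      have hx : (k, (-1:Int)) ∈ pvTrend l := by
        rw [mem_pvTrend]; dsimp only
        exact ⟨by omega, by omega, by rw [if_pos h1.1]⟩
      have hy : (k+1, (1:Int)) ∈ pvTrend l := by
        rw [mem_pvTrend]; dsimp only
        exact ⟨by omega, by rw [hadd]; omega, by rw [if_neg (by rw [hadd]; omega)]⟩
      exact ⟨((k, -1), (k+1, 1)),
        adj_mem_zip _ (pvTrend_pairwise l) _ _ hx hy rfl, ⟨rfl, by norm_num⟩, rfl⟩
    · exfalso
      apply he
      have hx : (k, (1:Int)) ∈ pvTrend l := by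
        rw [mem_pvTrend]; dsimp only
        exact ⟨by omega, by omega, by rw [if_neg (by omega)]⟩
      have hy : (k+1, (-1:Int)) ∈ pvTrend l := by
        rw [mem_pvTrend]; dsimp only
        exact ⟨by omega, by rw [hadd]; omega, by rw [if_pos (by rw [hadd]; omega)]⟩
      exact ⟨((k, 1), (k+1, -1)),
        adj_mem_zip _ (pvTrend_pairwise l) _ _ hx hy rfl, ⟨rfl, by norm_num⟩, rfl⟩
    · rfl

lemma solution_alt_eq_map (l : List Int) :
    solution_alt l = (List.range (l.length - 2)).map (pvW l) := by
  apply List.ext_getElem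
  · unfold solution_alt
    rw [length_foldl_pvStep]
    simp
  · intro k hk1 hk2
    have hk : k < l.length - 2 := by
      unfold solution_alt at hk1
      rw [length_foldl_pvStep] at hk1
      simpa using hk1
    have hlhs : (solution_alt l)[k]'hk1 = (solution_alt l).getD k 0 := by
      rw [List.getD_eq_getElem?_getD, List.getElem?_eq_getElem hk1]
      rfl
    rw [hlhs, solution_alt_getD l k hk]
    simp

-- ===== VERDICT (by name: the statement is the Claim_ definition above) =====
theorem solution_spec : Claim_equal_solution := by
  intro numbers _
  unfold Spec_solution
  rw [solution_eq_pvZig, solution_alt_eq_map, map_range_pvW]
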